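-- pv_equiv track=rewrite | github.com/Leticia2512/Proyecto-Final-Bootcamp-KeepCoding | RAG/documentos/transformv2.py | join_paragraph_lines
-- ===== SOURCE A (Python) =====
-- from typing import List
--
-- def join_paragraph_lines(lines: List[str]) -> List[str]:
--     out: List[str] = []
--     buffer: List[str] = []
--
--     def flush():
--         if buffer:
--             out.append(" ".join(buffer))
--             buffer.clear()
--
--     for ln in lines:
--         if ln:
--             buffer.append(ln)
--         else:
--             flush()
--     flush()
--     return out
-- ===== SOURCE B (Python) =====
-- from itertools import groupby
-- from typing import List
--
-- def join_paragraph_lines(lines: List[str]) -> List[str]: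
--     return [" ".join(g) for k, g in groupby(lines, key=bool) if k]
-- ===== Notes on version B (the rewrite author's own statement) =====
-- stated objective: simpler
-- what changed: Replaces the explicit buffer/flush state machine with itertools.groupby partitioning the lines into maximal runs by truthiness, joining each non-empty run in one comprehension.
import Mathlib
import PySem

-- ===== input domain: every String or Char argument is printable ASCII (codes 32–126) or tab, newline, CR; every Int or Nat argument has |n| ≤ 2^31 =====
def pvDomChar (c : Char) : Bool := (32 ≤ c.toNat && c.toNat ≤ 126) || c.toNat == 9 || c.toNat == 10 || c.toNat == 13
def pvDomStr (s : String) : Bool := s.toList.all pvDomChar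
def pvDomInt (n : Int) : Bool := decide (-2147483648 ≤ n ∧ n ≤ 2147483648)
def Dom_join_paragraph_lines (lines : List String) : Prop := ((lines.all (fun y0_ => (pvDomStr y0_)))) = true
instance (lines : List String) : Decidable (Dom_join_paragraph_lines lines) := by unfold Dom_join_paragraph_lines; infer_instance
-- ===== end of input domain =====

-- B replaces A's explicit buffer/flush state machine by grouping maximal runs of non-empty lines (itertools.groupby) and joining each run; same cost, simpler.

-- ===== PORT A =====
-- state is (out, buffer); flush() appends " ".join(buffer) only when buffer is non-empty
def join_paragraph_lines (lines : List String) : List String :=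
  let step := fun (s : List String × List String) (ln : String) =>
    if ln ≠ "" then (s.1, s.2 ++ [ln])
    else if s.2 ≠ ([] : List String) then (s.1 ++ [PySem.Str.join " " s.2], ([] : List String))
    else s
  let r := lines.foldl step ([], [])
  if r.2 ≠ ([] : List String) then r.1 ++ [PySem.Str.join " " r.2] else r.1

-- ===== PORT B =====
-- groupby(lines, key=bool): each maximal truthy run is takeWhile (· ≠ ""); falsy runs are skipped
def join_paragraph_lines_alt (lines : List String) : List String :=
  match lines with
  | [] => []
  | x :: xs =>
    if x = "" then join_paragraph_lines_alt xs
    else PySem.Str.join " " (x :: xs.takeWhile (· ≠ "")) ::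
         join_paragraph_lines_alt (xs.dropWhile (· ≠ ""))
termination_by lines.length
decreasing_by
  · simp
  · simpa using Nat.lt_succ_of_le (List.length_dropWhile_le _ _)

-- ===== PRECONDITION & SPEC =====
def Spec_join_paragraph_lines (lines : List String) (out : List String) : Prop := out = join_paragraph_lines_alt lines
instance (lines : List String) (out : List String) : Decidable (Spec_join_paragraph_lines lines out) := by unfold Spec_join_paragraph_lines; infer_instance

-- ===== CLAIM (what is proved, stated in full; the proofs are below) =====
def Claim_equal_join_paragraph_lines : Prop := ∀ (lines : List String), Dom_join_paragraph_lines lines → Spec_join_paragraph_lines lines (join_paragraph_lines lines)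

-- ===== LEMMAS AND PROOFS =====

-- A's per-line state machine, continued from pending buffer `buf`, then finalized
def jplAux (buf : List String) : List String → List String
  | [] => if buf ≠ ([] : List String) then [PySem.Str.join " " buf] else []
  | l :: ls =>
    if l = "" then
      (if buf ≠ ([] : List String) then PySem.Str.join " " buf :: jplAux [] ls else jplAux [] ls)
    else jplAux (buf ++ [l]) ls

theorem jplAux_spec (lines : List String) :
    (∀ buf, buf ≠ [] →
      jplAux buf lines =
        PySem.Str.join " " (buf ++ lines.takeWhile (· ≠ "")) ::
          join_paragraph_lines_alt (lines.dropWhile (· ≠ ""))) ∧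
    jplAux [] lines = join_paragraph_lines_alt lines := by
  induction lines with
  | nil =>
    refine ⟨fun buf hb => ?_, ?_⟩
    · simp [jplAux, hb, join_paragraph_lines_alt]
    · simp [jplAux, join_paragraph_lines_alt]
  | cons l ls ih =>
    constructor
    · intro buf hb
      by_cases hl : l = ""
      · subst hl
        simp [jplAux, hb, ih.2, List.takeWhile, List.dropWhile, join_paragraph_lines_alt]
      · have h2 := ih.1 (buf ++ [l]) (by simp)
        simp [jplAux, hl, h2, List.takeWhile, List.dropWhile]
    · by_cases hl : l = ""
      · subst hl
        simp [jplAux, ih.2, join_paragraph_lines_alt]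
      · have h2 := ih.1 [l] (by simp)
        simp [jplAux, hl, h2, join_paragraph_lines_alt]

theorem jpl_foldl (lines : List String) : ∀ (out buf : List String),
    (let r := lines.foldl (fun (s : List String × List String) (ln : String) =>
        if ln ≠ "" then (s.1, s.2 ++ [ln])
        else if s.2 ≠ ([] : List String) then (s.1 ++ [PySem.Str.join " " s.2], ([] : List String))
        else s) (out, buf)
     if r.2 ≠ ([] : List String) then r.1 ++ [PySem.Str.join " " r.2] else r.1)
      = out ++ jplAux buf lines := by
  induction lines with
  | nil =>
    intro out buf
    by_cases hb : buf = [] <;> simp [jplAux, hb]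
  | cons l ls ih =>
    intro out buf
    by_cases hl : l = ""
    · subst hl
      by_cases hb : buf = []
      · simpa [hb, jplAux] using ih out []
      · simpa [hb, jplAux, List.append_assoc] using ih (out ++ [PySem.Str.join " " buf]) []
    · simpa [hl, jplAux] using ih out (buf ++ [l])

-- ===== VERDICT (by name: the statement is the Claim_ definition above) =====
theorem join_paragraph_lines_spec : Claim_equal_join_paragraph_lines := by
  intro lines _
  unfold Spec_join_paragraph_lines join_paragraph_lines
  simpa using (jpl_foldl lines [] []).trans (by simp [(jplAux_spec lines).2])
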